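-- pv_equiv track=rewrite | github.com/glebkuznetsov/nucleic | nucleic/filters.py | gc_run
-- ===== SOURCE A (Python) =====
-- def gc_run(seq, run_length):
--     ''' Return True of seq has a maximum GC run length <= run_length
--     '''
--     lrun = 0
--     for b in seq:
--         if b in 'GC':
--             lrun += 1
--             if lrun > run_length:
--                 return False
--         else:
--             lrun = 0
--     return True
-- ===== SOURCE B (Python) =====
-- from itertools import groupby
--
-- def gc_run(seq, run_length):
--     ''' Return True of seq has a maximum GC run length <= run_length '''
--     groups = [sum(1 for _ in g) for k, g in groupby(seq, key=lambda b: b in 'GC') if k]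
--     return all(n <= run_length for n in groups)
-- ===== Notes on version B (the rewrite author's own statement) =====
-- stated objective: idiomatic
-- what changed: Replaced the stateful counter loop with an early return by an itertools.groupby decomposition into maximal GC runs, checking all run lengths with all().
import Mathlib
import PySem

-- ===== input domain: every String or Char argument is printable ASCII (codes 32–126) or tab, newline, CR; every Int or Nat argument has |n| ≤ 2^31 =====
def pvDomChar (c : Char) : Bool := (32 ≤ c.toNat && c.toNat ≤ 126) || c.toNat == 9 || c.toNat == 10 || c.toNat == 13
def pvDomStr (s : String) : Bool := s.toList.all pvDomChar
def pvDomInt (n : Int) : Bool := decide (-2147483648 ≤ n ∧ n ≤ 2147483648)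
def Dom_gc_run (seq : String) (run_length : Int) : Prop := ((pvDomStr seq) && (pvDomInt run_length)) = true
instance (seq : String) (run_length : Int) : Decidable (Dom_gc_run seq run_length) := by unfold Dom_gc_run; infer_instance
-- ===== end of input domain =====

-- B replaces A's stateful counter loop (with early return) by a groupby-style
-- decomposition into maximal GC runs and an all() over their lengths (idiomatic; same cost).

-- ===== PORT A =====
-- the for-loop of A: state is the running GC-run counter lrun; early 'return False' = false
def gcRunLoopA (run_length : Int) : List Char → Int → Bool
  | [], _ => true
  | b :: rest, lrun =>
    if b == 'G' || b == 'C' then   -- `b in 'GC'` for a single character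
      if lrun + 1 > run_length then false
      else gcRunLoopA run_length rest (lrun + 1)
    else gcRunLoopA run_length rest 0

def gc_run (seq : String) (run_length : Int) : Bool :=
  gcRunLoopA run_length seq.toList 0

-- ===== PORT B =====
-- the groupby key `b in 'GC'`
def pvIsGC (b : Char) : Bool := b == 'G' || b == 'C'

-- lengths of the maximal GC runs (the groups of groupby whose key is True)
def gcGroups : List Char → List Int
  | [] => []
  | b :: rest =>
    if pvIsGC b then
      ((1 : Int) + (rest.takeWhile pvIsGC).length) :: gcGroups (rest.dropWhile pvIsGC)
    else gcGroups rest
termination_by l => l.length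
decreasing_by
  · have := List.length_dropWhile_le pvIsGC rest; simp; omega
  · simp

def gc_run_alt (seq : String) (run_length : Int) : Bool :=
  (gcGroups seq.toList).all (fun n => decide (n ≤ run_length))

-- ===== PRECONDITION & SPEC =====
def Spec_gc_run (seq : String) (run_length : Int) (out : Bool) : Prop := out = gc_run_alt seq run_length
instance (seq : String) (run_length : Int) (out : Bool) : Decidable (Spec_gc_run seq run_length out) := by unfold Spec_gc_run; infer_instance

-- ===== CLAIM (what is proved, stated in full; the proofs are below) =====
def Claim_equal_gc_run : Prop := ∀ (seq : String) (run_length : Int), Dom_gc_run seq run_length → Spec_gc_run seq run_length (gc_run seq run_length)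

-- ===== LEMMAS AND PROOFS =====

theorem gc_main (rl : Int) (N : Nat) : ∀ (l : List Char), l.length ≤ N →
    (gcRunLoopA rl l 0 = (gcGroups l).all (fun n => decide (n ≤ rl))) ∧
    (∀ lrun : Int, 0 < lrun → lrun ≤ rl →
      gcRunLoopA rl l lrun =
        (decide (lrun + (l.takeWhile pvIsGC).length ≤ rl) &&
         (gcGroups (l.dropWhile pvIsGC)).all (fun n => decide (n ≤ rl)))) := by
  induction N with
  | zero =>
    intro l hl
    have : l = [] := List.eq_nil_of_length_eq_zero (Nat.le_zero.mp hl)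
    subst this
    refine ⟨by simp [gcRunLoopA, gcGroups], ?_⟩
    intro lrun _ hle
    simp [gcRunLoopA, gcGroups, hle]
  | succ n IH =>
    intro l hl
    cases l with
    | nil =>
      refine ⟨by simp [gcRunLoopA, gcGroups], ?_⟩
      intro lrun _ hle
      simp [gcRunLoopA, gcGroups, hle]
    | cons b rest =>
      have hrest : rest.length ≤ n := by simpa using Nat.succ_le_succ_iff.mp hl
      have hdrop : (rest.dropWhile pvIsGC).length ≤ n :=
        le_trans (List.length_dropWhile_le pvIsGC rest) hrest
      have htw : (0 : Int) ≤ ((rest.takeWhile pvIsGC).length : Int) := by positivity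
      by_cases hb : pvIsGC b = true
      · have hb' : (b == 'G' || b == 'C') = true := hb
        constructor
        · by_cases hr : (0 : Int) + 1 > rl
          · have h1 : ¬ ((1 : Int) + (rest.takeWhile pvIsGC).length ≤ rl) := by omega
            simp [gcRunLoopA, gcGroups, hb, hb', h1]
            exact fun h => absurd h (by omega)
          · have h1 : (1 : Int) ≤ rl := by omega
            have := (IH rest hrest).2 1 (by norm_num) h1
            simp only [gcRunLoopA, hb', if_neg hr]
            simp [gcGroups, hb]
            exact this
        · intro lrun hpos hle
          by_cases hr : lrun + 1 > rl
          · have h1 : ¬ (lrun + ((b :: rest).takeWhile pvIsGC).length ≤ rl) := by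
              simp [List.takeWhile_cons, hb]; push_cast; omega
            simp [gcRunLoopA, hb', hr, h1]
          · have := (IH rest hrest).2 (lrun + 1) (by omega) (by omega)
            simp only [gcRunLoopA, hb', if_neg hr, this]
            simp only [List.takeWhile_cons, hb, List.dropWhile_cons, if_true,
              List.length_cons]
            congr 1
            rw [decide_eq_decide]
            push_cast
            constructor <;> (intro h; omega)
      · have hb' : (b == 'G' || b == 'C') = false := by
          simpa [pvIsGC] using hb
        have h0 := (IH rest hrest).1
        constructor
        · simp [gcRunLoopA, hb', gcGroups, hb, h0]
        · intro lrun hpos hle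
          simp [gcRunLoopA, hb', gcGroups, hb, h0, List.takeWhile_cons,
            List.dropWhile_cons, hle]

-- ===== VERDICT (by name: the statement is the Claim_ definition above) =====
theorem gc_run_spec : Claim_equal_gc_run := by
  intro seq rl _
  unfold Spec_gc_run gc_run gc_run_alt
  exact (gc_main rl seq.toList.length seq.toList le_rfl).1
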